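-- pv_equiv track=rewrite | github.com/88abaa99/DahuHunting | toolbox.py | truncate_degree
-- ===== SOURCE A (Python) =====
-- def truncate_degree(f, deg_min, deg_max):
--     """
--     Truncates the specified degree (resp. weight) of a specified ANF (resp. Walsh spectrum).
--
--     Parameters
--     ----------
--     f : array of Booleans or integers
--         ANF or Walsh spectrum.
--     deg_min : integer
--         minimal degree or weight.
--     deg_max : integer
--         maximal degree or weight.
--
--     Returns
--     -------
--     res : array of Booleans or integers
--         truncated result.
--
--     """
--     res = []
--     for i in range(len(f)):
--         deg = 0
--         j=0
--         while (i>>j) != 0: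
--             if (i>>j)%2 == 1:
--                 deg += 1
--             j += 1
--         if deg >= deg_min and deg <= deg_max:
--             res.append(f[i])
--     return res
-- ===== SOURCE B (Python) =====
-- def truncate_degree(f, deg_min, deg_max):
--     # DP popcount: deg[i] = deg[i >> 1] + (i & 1), one pass, then filter.
--     deg = [0]
--     for i in range(1, len(f)):
--         deg.append(deg[i >> 1] + (i & 1))
--     return [x for x, d in zip(f, deg) if deg_min <= d <= deg_max]
-- ===== Notes on version B (the rewrite author's own statement) =====
-- stated objective: faster
-- what changed: Replaces the per-index bit-shift while loop (O(log i) per element) with a dynamic-programming popcount table deg[i] = deg[i>>1] + (i&1) filled in one pass, then a single zip-filter.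
import Mathlib
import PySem

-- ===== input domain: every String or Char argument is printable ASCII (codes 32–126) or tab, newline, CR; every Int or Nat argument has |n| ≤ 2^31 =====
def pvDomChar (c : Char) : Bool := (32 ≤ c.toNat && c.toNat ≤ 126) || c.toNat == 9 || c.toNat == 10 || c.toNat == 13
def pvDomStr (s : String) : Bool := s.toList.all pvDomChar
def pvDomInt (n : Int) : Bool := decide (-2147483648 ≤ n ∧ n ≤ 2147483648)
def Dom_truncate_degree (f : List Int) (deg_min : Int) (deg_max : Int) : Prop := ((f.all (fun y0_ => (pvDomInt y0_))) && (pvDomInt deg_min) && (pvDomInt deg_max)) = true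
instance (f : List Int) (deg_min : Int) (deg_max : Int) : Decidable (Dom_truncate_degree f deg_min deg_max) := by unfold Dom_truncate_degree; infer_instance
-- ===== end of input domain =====

-- B replaces A's per-index bit-shift popcount loop by a one-pass DP table deg[i] = deg[i>>1] + (i&1); objective: faster.

-- ===== PORT A =====
-- the 'while (i>>j) != 0' loop: the state i>>j halves each step (i>>(j+1) = (i>>j)/2)
def truncDegLoop (m : Nat) (deg : Nat) : Nat :=
  if m = 0 then deg else truncDegLoop (m / 2) (if m % 2 = 1 then deg + 1 else deg)

def truncate_degree (f : List Int) (deg_min : Int) (deg_max : Int) : List Int :=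
  (List.range f.length).foldl (fun res i =>
    let deg := truncDegLoop i 0
    if deg_min ≤ (deg : Int) ∧ (deg : Int) ≤ deg_max then res ++ [PySem.List.pyGetD f (i : Int) 0] else res) []

-- ===== PORT B =====
def truncate_degree_alt (f : List Int) (deg_min : Int) (deg_max : Int) : List Int :=
  let deg : List Int := (List.range' 1 (f.length - 1)).foldl
    (fun d i => d ++ [d.getD (i / 2) 0 + (i % 2 : Nat)]) [0]
  ((f.zip deg).filter (fun p => decide (deg_min ≤ p.2 ∧ p.2 ≤ deg_max))).map Prod.fst

-- ===== PRECONDITION & SPEC =====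
def Spec_truncate_degree (f : List Int) (deg_min : Int) (deg_max : Int) (out : List Int) : Prop := out = truncate_degree_alt f deg_min deg_max
instance (f : List Int) (deg_min : Int) (deg_max : Int) (out : List Int) : Decidable (Spec_truncate_degree f deg_min deg_max out) := by unfold Spec_truncate_degree; infer_instance

-- ===== CLAIM (what is proved, stated in full; the proofs are below) =====
def Claim_equal_truncate_degree : Prop := ∀ (f : List Int) (deg_min : Int) (deg_max : Int), Dom_truncate_degree f deg_min deg_max → Spec_truncate_degree f deg_min deg_max (truncate_degree f deg_min deg_max)

-- ===== LEMMAS AND PROOFS =====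

theorem truncDegLoop_add (m : Nat) : ∀ d, truncDegLoop m d = d + truncDegLoop m 0 := by
  induction m using Nat.strong_induction_on with
  | _ m ih =>
    intro d
    by_cases h0 : m = 0
    · simp [h0, truncDegLoop]
    · rw [truncDegLoop]
      conv_rhs => rw [truncDegLoop]
      simp only [h0, if_false]
      have hlt : m / 2 < m := Nat.div_lt_self (Nat.pos_of_ne_zero h0) (by norm_num)
      rw [ih (m / 2) hlt, ih (m / 2) hlt (if m % 2 = 1 then 0 + 1 else 0)]
      generalize truncDegLoop (m / 2) 0 = p
      split_ifs <;> omega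

theorem truncDegLoop_step (m : Nat) (h : m ≠ 0) :
    truncDegLoop m 0 = truncDegLoop (m / 2) 0 + m % 2 := by
  rw [truncDegLoop]
  simp only [h, if_false]
  rw [truncDegLoop_add]
  have := Nat.mod_two_eq_zero_or_one m
  split_ifs <;> omega

theorem degTable (k : Nat) :
    (List.range' 1 k).foldl (fun (d : List Int) (i : Nat) => d ++ [d.getD (i / 2) 0 + (i % 2 : Nat)]) [0]
      = (List.range (k + 1)).map (fun i => (truncDegLoop i 0 : Int)) := by
  induction k with
  | zero =>
    have h0 : truncDegLoop 0 0 = 0 := by rw [truncDegLoop]; simp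
    simp [h0]
  | succ k ih =>
    rw [List.range'_concat, List.foldl_append, ih]
    simp only [List.foldl_cons, List.foldl_nil]
    have hk1 : 1 + 1 * k = k + 1 := by omega
    rw [hk1]
    have hlt : (k + 1) / 2 < k + 1 := by omega
    rw [List.getD_eq_getElem?_getD, List.getElem?_map, List.getElem?_range hlt]
    have hstep : truncDegLoop (k + 1) 0 = truncDegLoop ((k + 1) / 2) 0 + (k + 1) % 2 :=
      truncDegLoop_step _ (by omega)
    simp [List.range_succ, hstep]

theorem zip_map_range {α β : Type} (f : List α) (d : α) (g : Nat → β) :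
    f.zip ((List.range f.length).map g)
      = (List.range f.length).map (fun i => (f.getD i d, g i)) := by
  apply List.ext_getElem
  · simp
  · intro i h1 h2
    simp only [List.getElem_zip, List.getElem_map, List.getElem_range]
    have hi : i < f.length := by simpa using h2
    rw [List.getD_eq_getElem?_getD, List.getElem?_eq_getElem hi]
    simp

theorem foldl_ite_append {α β : Type} (P : α → Prop) [DecidablePred P] (g : α → β) :
    ∀ (l : List α) (acc : List β),
      l.foldl (fun r x => if P x then r ++ [g x] else r) acc
        = acc ++ (l.filter (fun x => decide (P x))).map g := by
  intro l
  induction l with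
  | nil => simp
  | cons x l ih =>
    intro acc
    simp only [List.foldl_cons, List.filter_cons]
    by_cases h : P x
    · simp [h, ih]
    · simp [h, ih]

-- ===== VERDICT (by name: the statement is the Claim_ definition above) =====
theorem truncate_degree_spec : Claim_equal_truncate_degree := by
  intro f deg_min deg_max _
  unfold Spec_truncate_degree truncate_degree truncate_degree_alt
  rcases f with _ | ⟨a, f'⟩
  · simp
  · rw [foldl_ite_append (fun i : Nat => deg_min ≤ (truncDegLoop i 0 : Int) ∧ (truncDegLoop i 0 : Int) ≤ deg_max)
          (fun i => PySem.List.pyGetD (a :: f') (i : Int) 0) (List.range (a :: f').length) []]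
    have hn : (a :: f').length - 1 = f'.length := by simp
    rw [hn, degTable f'.length]
    have hlen : f'.length + 1 = (a :: f').length := by simp
    rw [hlen]
    simp only [zip_map_range (a :: f') 0, List.filter_map, List.map_map]
    simp [Function.comp_def, PySem.List.pyGetD_natCast]
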